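-- pv_equiv track=rewrite | github.com/pympk/py311 | stocks/notebooks_RLVR/core/logic.py | slugify_columns
-- ===== SOURCE A (Python) =====
-- from typing import List
--
-- def slugify_columns(columns: List[str]) -> List[str]:
--     """Ensures names are machine-safe: 21d_Sharpe_(ATRP) -> 21d_Sharpe_ATRP"""
--     return [
--         c.replace(" ", "_")
--         .replace("(", "")
--         .replace(")", "")
--         .replace("-", "")
--         .replace(",", "")  # Added to handle "Alpha, 63d"
--         .replace("__", "_")  # Clean up double underscores
--         for c in columns
--     ]
-- ===== SOURCE B (Python) =====
-- def slugify_columns(columns):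
--     """Ensures names are machine-safe: 21d_Sharpe_(ATRP) -> 21d_Sharpe_ATRP"""
--     out = []
--     for c in columns:
--         pieces = []
--         for ch in c:
--             if ch == ' ':
--                 pieces.append('_')
--             elif ch in '()-,':
--                 pass  # drop it
--             else:
--                 pieces.append(ch)
--         out.append(''.join(pieces).replace('__', '_'))
--     return out
-- ===== Notes on version B (the rewrite author's own statement) =====
-- stated objective: simpler
-- what changed: Replaces the five chained full-string replace scans with a single explicit per-character pass (space -> '_', drop '()-,', keep the rest) followed by the one literal '__'->'_' collapse.
import Mathlib
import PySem

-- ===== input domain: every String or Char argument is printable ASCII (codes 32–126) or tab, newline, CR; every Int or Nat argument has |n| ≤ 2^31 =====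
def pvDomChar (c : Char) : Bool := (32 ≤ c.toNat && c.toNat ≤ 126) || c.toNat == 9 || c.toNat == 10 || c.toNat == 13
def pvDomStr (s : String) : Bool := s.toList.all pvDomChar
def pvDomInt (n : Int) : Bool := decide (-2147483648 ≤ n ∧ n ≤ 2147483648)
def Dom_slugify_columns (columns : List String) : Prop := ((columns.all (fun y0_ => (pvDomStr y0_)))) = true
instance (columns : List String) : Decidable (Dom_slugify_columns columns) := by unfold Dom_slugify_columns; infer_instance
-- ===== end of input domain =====

-- B builds each sanitized name in one explicit per-character pass (space -> '_', drop '()-,', keep the rest)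
-- followed by the single literal '__'->'_' collapse, instead of A's five chained full-string replace passes (objective: simpler).


-- ===== PORT A =====
def slugify_columns (columns : List String) : List String :=
  columns.map (fun c =>
    PySem.Str.replace
      (PySem.Str.replace
        (PySem.Str.replace
          (PySem.Str.replace
            (PySem.Str.replace
              (PySem.Str.replace c " " "_")
              "(" "")
            ")" "")
          "-" "")
        "," "")
      "__" "_")

-- ===== PORT B =====
-- per-character translation: '_' for a space, drop any of '()-,' (the `ch in '()-,'` test), keep the char
def pvSlugChar (ch : Char) : List Char :=
  if ch = ' ' then ['_']
  else if ch = '(' ∨ ch = ')' ∨ ch = '-' ∨ ch = ',' then []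
  else [ch]

def slugify_columns_alt (columns : List String) : List String :=
  columns.map (fun c =>
    PySem.Str.replace (String.ofList (c.toList.flatMap pvSlugChar)) "__" "_")

-- ===== PRECONDITION & SPEC =====
def Spec_slugify_columns (columns : List String) (out : List String) : Prop := out = slugify_columns_alt columns
instance (columns : List String) (out : List String) : Decidable (Spec_slugify_columns columns out) := by unfold Spec_slugify_columns; infer_instance

-- ===== CLAIM (what is proved, stated in full; the proofs are below) =====
def Claim_equal_slugify_columns : Prop := ∀ (columns : List String), Dom_slugify_columns columns → Spec_slugify_columns columns (slugify_columns columns)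

-- ===== LEMMAS AND PROOFS =====

-- replace.go with a single-character pattern is the per-character flatMap
theorem pv_go_single (a : Char) (new : List Char) :
    ∀ (fuel : Nat) (l acc : List Char), l.length ≤ fuel →
      PySem.Chars.replace.go [a] new fuel l acc
        = acc.reverse ++ l.flatMap (fun c => if c = a then new else [c]) := by
  intro fuel
  induction fuel with
  | zero => intro l acc h; rw [PySem.Chars.replace.go]; cases l <;> simp_all
  | succ n ih =>
    intro l acc h
    cases l with
    | nil => rw [PySem.Chars.replace.go]; simp; omega
    | cons c t =>
      rw [PySem.Chars.replace.go]
      by_cases hc : c = a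
      · simp [hc, List.isPrefixOf, ih t _ (by simpa using h)]
      · simp [List.isPrefixOf, hc, (by simpa [eq_comm] using hc : ¬ a = c), ih t _ (by simpa using h)]

theorem pv_replace_single (s : List Char) (a : Char) (new : List Char) :
    PySem.Chars.replace s [a] new = s.flatMap (fun c => if c = a then new else [c]) := by
  rw [PySem.Chars.replace]
  simp [pv_go_single a new s.length s [] le_rfl]

-- A's first five replace passes over one column equal B's single per-character pass
theorem pv_chain_eq_pass (c : String) :
    PySem.Str.replace
      (PySem.Str.replace
        (PySem.Str.replace
          (PySem.Str.replace
            (PySem.Str.replace c " " "_")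
            "(" "")
          ")" "")
        "-" "")
      "," ""
    = String.ofList (c.toList.flatMap pvSlugChar) := by
  have h : (PySem.Str.replace
      (PySem.Str.replace
        (PySem.Str.replace
          (PySem.Str.replace
            (PySem.Str.replace c " " "_")
            "(" "")
          ")" "")
        "-" "")
      "," "").toList = c.toList.flatMap pvSlugChar := by
    simp only [PySem.Str.toList_replace]
    have hsp : (" " : String).toList = [' '] := rfl
    have hus : ("_" : String).toList = ['_'] := rfl
    have hop : ("(" : String).toList = ['('] := rfl
    have hcp : (")" : String).toList = [')'] := rfl
    have hda : ("-" : String).toList = ['-'] := rfl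
    have hco : ("," : String).toList = [','] := rfl
    have hem : ("" : String).toList = [] := rfl
    rw [hsp, hus, hop, hcp, hda, hco, hem]
    rw [pv_replace_single, pv_replace_single, pv_replace_single, pv_replace_single,
        pv_replace_single]
    rw [List.flatMap_assoc, List.flatMap_assoc, List.flatMap_assoc, List.flatMap_assoc]
    apply List.flatMap_congr
    intro x _
    by_cases h1 : x = ' '
    · simp [h1, pvSlugChar]
    · by_cases h2 : x = '('
      · simp [h2, pvSlugChar]
      · by_cases h3 : x = ')'
        · simp [h3, pvSlugChar]
        · by_cases h4 : x = '-'
          · simp [h4, pvSlugChar]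
          · by_cases h5 : x = ','
            · simp [h5, pvSlugChar]
            · simp [pvSlugChar, h1, h2, h3, h4, h5]
  rw [← h, String.ofList_toList]

-- ===== VERDICT (by name: the statement is the Claim_ definition above) =====
theorem slugify_columns_spec : Claim_equal_slugify_columns := by
  intro columns _
  unfold Spec_slugify_columns slugify_columns slugify_columns_alt
  apply List.map_congr_left
  intro c _
  rw [pv_chain_eq_pass c]
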